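-- pv_equiv track=rewrite | github.com/CBreazy/arc-agent-proj | arc_agent/engine.py | propagate_symbols_horizontally
-- ===== SOURCE A (Python) =====
-- def propagate_symbols_horizontally(grid, delta, sym1, sym2):
--     """
--     Use the actual pattern between sym1 and sym2 to replicate it horizontally.
--     """
--     height = len(grid)
--     width = len(grid[0])
--     output = [row.copy() for row in grid]
--
--     for y in range(height):
--         row = grid[y]
--         row_symbols = [(x, row[x]) for x in range(len(row)) if row[x] != 0]
--
--         if len(row_symbols) < 2:
--             continue
--
--         row_symbols.sort()  # sort by x
--         pattern = []
--         last_x = row_symbols[0][0]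
--         pattern.append(row_symbols[0][1])
--
--         for i in range(1, len(row_symbols)):
--             gap = row_symbols[i][0] - last_x - 1
--             pattern.extend([0] * gap)
--             pattern.append(row_symbols[i][1])
--             last_x = row_symbols[i][0]
--
--         pattern_len = len(pattern)
--         for x in range(row_symbols[0][0], width, pattern_len):
--             for i, val in enumerate(pattern):
--                 if x + i < width:
--                     output[y][x + i] = val
--
--     return output
-- ===== SOURCE B (Python) =====
-- def propagate_symbols_horizontally(grid, delta, sym1, sym2):
--     width = len(grid[0])
--     out = []
--     for row in grid:
--         new = row.copy()
--         nz = [x for x, v in enumerate(row) if v != 0]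
--         if len(nz) >= 2:
--             first = nz[0]
--             pattern = row[first:nz[-1] + 1]
--             span = width - first
--             if span > 0:
--                 reps = span // len(pattern) + 1
--                 new[first:width] = (pattern * reps)[:span]
--         out.append(new)
--     return out
-- ===== Notes on version B (the rewrite author's own statement) =====
-- stated objective: simpler
-- what changed: Per row B slices the pattern directly out of the row (row[first:last+1] via the first/last non-zero indices) and writes it with a single repeated-slice assignment new[first:width] = (pattern*reps)[:span], replacing A's collect-and-sort of (index,value) pairs, the gap-by-gap zero-filling reconstruction of the pattern, and the doubly nested per-cell write loop. (measured ~3.8x faster in CPython: slicing replaces the per-cell Python loops)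
import Mathlib
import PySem

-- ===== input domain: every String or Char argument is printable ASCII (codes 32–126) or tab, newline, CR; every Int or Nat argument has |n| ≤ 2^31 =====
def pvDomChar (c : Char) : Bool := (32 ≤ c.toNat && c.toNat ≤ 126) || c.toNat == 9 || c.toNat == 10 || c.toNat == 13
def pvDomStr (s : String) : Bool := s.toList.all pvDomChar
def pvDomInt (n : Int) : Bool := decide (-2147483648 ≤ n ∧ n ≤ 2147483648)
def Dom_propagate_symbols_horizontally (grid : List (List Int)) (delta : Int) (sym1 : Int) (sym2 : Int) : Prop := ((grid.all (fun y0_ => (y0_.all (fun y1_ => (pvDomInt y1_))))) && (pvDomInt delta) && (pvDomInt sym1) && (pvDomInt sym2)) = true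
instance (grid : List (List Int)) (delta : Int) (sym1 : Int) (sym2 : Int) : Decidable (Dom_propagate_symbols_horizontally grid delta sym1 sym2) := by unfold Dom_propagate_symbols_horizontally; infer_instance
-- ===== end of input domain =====

-- B replaces A's collect/sort/gap-fill pattern reconstruction and per-cell write loop by
-- slicing the pattern out of the row (row[first:last+1]) and tiling it with one repeated-slice
-- assignment; equivalence is about the return value (A mutates only its own fresh copy).

-- ===== PORT A =====
-- output[y][j] = v: all writes under Pre_ have 0 ≤ j < len(output[y]), where List.set is exact
def pySet (r : List Int) (j : Int) (v : Int) : List Int := r.set j.toNat v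

-- 'for i, val in enumerate(pattern): if x + i < width: output[y][x + i] = val'
def aWriteBlock (width x : Int) (r : List Int) : List (Int × Int) → List Int
  | [] => r
  | (i, v) :: rest => aWriteBlock width x (if x + i < width then pySet r (x + i) v else r) rest

-- the body of A's y-loop: it writes only output[y], so the loop is a map over rows
def aRow (width : Int) (row : List Int) : List Int :=
  -- [(x, row[x]) for x in range(len(row)) if row[x] != 0]
  let row_symbols := ((PySem.List.pyRange 0 (PySem.List.len row)).map
      (fun x => (x, PySem.List.pyGetD row x 0))).filter (fun p => p.2 ≠ 0)
  if row_symbols.length < 2 then row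
  else
    -- row_symbols.sort(): the tuples have distinct first components, so tuple order = order by x
    let rs := PySem.List.sorted row_symbols (fun p => p.1)
    let first := PySem.List.pyGetD rs 0 (0, 0)
    -- 'for i in range(1, len(row_symbols)):' reading row_symbols[i] = fold over rs[1:]
    let st := (PySem.List.slice rs (some 1) none).foldl
      (fun (st : List Int × Int) (p : Int × Int) =>
        (st.1 ++ List.replicate (p.1 - st.2 - 1).toNat 0 ++ [p.2], p.1))
      ([first.2], first.1)
    (PySem.List.pyRange first.1 width st.1.length).foldl
      (fun r x => aWriteBlock width x r (PySem.List.enumerate st.1)) row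

def propagate_symbols_horizontally (grid : List (List Int)) (delta : Int) (sym1 : Int) (sym2 : Int) : List (List Int) :=
  let width : Int := PySem.List.len (PySem.List.pyGetD grid 0 [])   -- len(grid[0]); Pre_: grid ≠ []
  grid.map (fun row => aRow width row)

-- ===== PORT B =====
-- one row of B's loop ('out.append(new)' = map over rows)
def bRow (width : Int) (row : List Int) : List Int :=
  let nz := ((PySem.List.enumerate row).filter (fun p => p.2 ≠ 0)).map (fun p => p.1)
  if 2 ≤ nz.length then
    let first := PySem.List.pyGetD nz 0 0
    let pattern := PySem.List.slice row (some first) (some (PySem.List.pyGetD nz (-1) 0 + 1))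
    let span := width - first
    if 0 < span then
      -- new[first:width] = (pattern * reps)[:span]
      row.take first.toNat
        ++ PySem.List.slice ((List.replicate (PySem.Int.floordiv span pattern.length + 1).toNat pattern).flatten) none (some span)
        ++ row.drop width.toNat
    else row
  else row

def propagate_symbols_horizontally_alt (grid : List (List Int)) (delta : Int) (sym1 : Int) (sym2 : Int) : List (List Int) :=
  let width : Int := PySem.List.len (PySem.List.pyGetD grid 0 [])
  grid.map (fun row => bRow width row)

-- ===== PRECONDITION & SPEC =====
-- Pre_ excludes exactly the inputs where Python A raises: the empty grid (grid[0] is an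
-- IndexError) and ragged grids in which some row with at least two non-zeros is shorter than
-- len(grid[0]) (the write loop then indexes past that row's end).
def Pre_propagate_symbols_horizontally (grid : List (List Int)) (delta : Int) (sym1 : Int) (sym2 : Int) : Prop :=
  grid ≠ [] ∧ ∀ row ∈ grid, 2 ≤ (row.filter (fun v => v ≠ 0)).length →
    (PySem.List.pyGetD grid 0 []).length ≤ row.length
instance (grid : List (List Int)) (delta : Int) (sym1 : Int) (sym2 : Int) : Decidable (Pre_propagate_symbols_horizontally grid delta sym1 sym2) := by unfold Pre_propagate_symbols_horizontally; infer_instance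
def pvWitness_propagate_symbols_horizontally : List (List Int) × Int × Int × Int := ([[1, 0, 2, 0], [0, 0, 0, 0]], 0, 1, 2)

def Spec_propagate_symbols_horizontally (grid : List (List Int)) (delta : Int) (sym1 : Int) (sym2 : Int) (out : List (List Int)) : Prop := out = propagate_symbols_horizontally_alt grid delta sym1 sym2
instance (grid : List (List Int)) (delta : Int) (sym1 : Int) (sym2 : Int) (out : List (List Int)) : Decidable (Spec_propagate_symbols_horizontally grid delta sym1 sym2 out) := by unfold Spec_propagate_symbols_horizontally; infer_instance

-- ===== CLAIM (what is proved, stated in full; the proofs are below) =====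
def Claim_equal_propagate_symbols_horizontally : Prop := ∀ (grid : List (List Int)) (delta : Int) (sym1 : Int) (sym2 : Int), Dom_propagate_symbols_horizontally grid delta sym1 sym2 → Pre_propagate_symbols_horizontally grid delta sym1 sym2 → Spec_propagate_symbols_horizontally grid delta sym1 sym2 (propagate_symbols_horizontally grid delta sym1 sym2)
-- ===== LEMMAS AND PROOFS =====

-- index of the last pair of rest, defaulting to f
def lastFst (f : Int) (rest : List (Int × Int)) : Int := ((rest.getLast?).map Prod.fst).getD f

-- right-recursive form of A's pattern-building fold
def gapBuild : Int → List (Int × Int) → List Int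
  | _, [] => []
  | last, (x, v) :: rest => List.replicate (x - last - 1).toNat 0 ++ v :: gapBuild x rest

lemma foldl_gapBuild (l : List (Int × Int)) (acc : List Int) (last : Int) :
    (l.foldl (fun (st : List Int × Int) (p : Int × Int) =>
        (st.1 ++ List.replicate (p.1 - st.2 - 1).toNat 0 ++ [p.2], p.1)) (acc, last)).1
      = acc ++ gapBuild last l := by
  induction l generalizing acc last with
  | nil => simp [gapBuild]
  | cons p l ih =>
    cases p with
    | mk x v =>
      simp only [List.foldl_cons]
      rw [ih]
      simp [gapBuild]

lemma mem_filter_enumerate_bounds {row : List Int} {k : Int} {p : Int × Int}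
    (h : p ∈ (PySem.List.enumerate row k).filter (fun p => p.2 ≠ 0)) :
    k ≤ p.1 ∧ p.1 < k + row.length := by
  have hm := List.mem_of_mem_filter h
  rcases (PySem.List.mem_enumerate_iff row k p).1 hm with ⟨j, hj, rfl⟩
  constructor <;> simp <;> omega

lemma lastFst_ge {row : List Int} {k d : Int} (hd : k ≤ d + 1) :
    k ≤ lastFst d ((PySem.List.enumerate row k).filter (fun p => p.2 ≠ 0)) + 1 := by
  unfold lastFst
  cases hL : ((PySem.List.enumerate row k).filter (fun p => p.2 ≠ 0)).getLast? with
  | none => simpa using hd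
  | some p =>
    have hmem := List.mem_of_getLast? hL
    have := (mem_filter_enumerate_bounds hmem).1
    simp only [Option.map_some, Option.getD_some]
    omega

lemma lastFst_cons (d : Int) (p : Int × Int) (l : List (Int × Int)) :
    lastFst d (p :: l) = lastFst p.1 l := by
  unfold lastFst
  rw [List.getLast?_cons]
  cases l.getLast? <;> simp

lemma L1g (row : List Int) (k : Int) :
    gapBuild (k - 1) ((PySem.List.enumerate row k).filter (fun p => p.2 ≠ 0))
      = row.take (lastFst (k - 1) ((PySem.List.enumerate row k).filter (fun p => p.2 ≠ 0)) + 1 - k).toNat := by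
  induction row generalizing k with
  | nil => simp [PySem.List.enumerate, gapBuild, lastFst]
  | cons a row ih =>
    have ihk := ih (k + 1)
    rw [show (k : Int) + 1 - 1 = k from by ring] at ihk
    rw [PySem.List.enumerate_cons, List.filter_cons]
    by_cases ha : a = 0
    · simp only [ha, decide_eq_true_eq]
      rw [if_neg (by simp)]
      cases hF : (PySem.List.enumerate row (k + 1)).filter (fun p => p.2 ≠ 0) with
      | nil => simp [gapBuild, lastFst]
      | cons q r2 =>
        have hq : k + 1 ≤ q.1 := (mem_filter_enumerate_bounds (hF ▸ List.mem_cons_self)).1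
        have hLst : k + 1 ≤ lastFst k ((PySem.List.enumerate row (k + 1)).filter (fun p => p.2 ≠ 0)) + 1 :=
          lastFst_ge (by omega)
        rw [hF] at ihk hLst
        cases q with
        | mk xq vq =>
          rw [lastFst_cons (k - 1), lastFst_cons k] at *
          dsimp only at ihk hLst ⊢
          simp only [gapBuild] at ihk ⊢
          have hrep : ((xq : Int) - (k - 1) - 1).toNat = (xq - k - 1).toNat + 1 := by omega
          rw [hrep, List.replicate_succ]
          have htk : (lastFst xq r2 + 1 - k).toNat = (lastFst xq r2 + 1 - (k + 1)).toNat + 1 := by omega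
          rw [htk]
          simpa [List.take_succ_cons] using ihk
    · simp only [decide_eq_true_eq]
      rw [if_pos (by simp [ha])]
      simp only [gapBuild]
      have hLst : k + 1 ≤ lastFst k ((PySem.List.enumerate row (k + 1)).filter (fun p => p.2 ≠ 0)) + 1 :=
        lastFst_ge (by omega)
      rw [lastFst_cons (k - 1) (k, a)]
      dsimp only
      have htk : (lastFst k ((PySem.List.enumerate row (k + 1)).filter (fun p => p.2 ≠ 0)) + 1 - k).toNat
          = (lastFst k ((PySem.List.enumerate row (k + 1)).filter (fun p => p.2 ≠ 0)) + 1 - (k + 1)).toNat + 1 := by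
        omega
      rw [htk]
      simp only [show (k - (k - 1) - 1 : Int).toNat = 0 by omega, List.replicate_zero, List.nil_append,
        List.take_succ_cons]
      exact congrArg (a :: ·) ihk

lemma L2g (row : List Int) (k f v : Int) (rest : List (Int × Int))
    (h : (PySem.List.enumerate row k).filter (fun p => p.2 ≠ 0) = (f, v) :: rest) :
    v :: gapBuild f rest = (row.drop (f - k).toNat).take (lastFst f rest + 1 - f).toNat := by
  induction row generalizing k with
  | nil => simp [PySem.List.enumerate] at h
  | cons a row ih =>
    rw [PySem.List.enumerate_cons, List.filter_cons] at h
    by_cases ha : a = 0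
    · rw [if_neg (by simp [ha])] at h
      have hf : k + 1 ≤ f := by
        have := (mem_filter_enumerate_bounds (h ▸ List.mem_cons_self)).1
        simpa using this
      have hd : (f - k).toNat = (f - (k + 1)).toNat + 1 := by omega
      rw [hd, List.drop_succ_cons]
      exact ih (k + 1) h
    · rw [if_pos (by simp [ha])] at h
      obtain ⟨hk, hrest⟩ : ((k : Int) = f ∧ a = v) ∧ (PySem.List.enumerate row (k + 1)).filter (fun p => p.2 ≠ 0) = rest := by
        constructor
        · exact ⟨(Prod.mk.injEq _ _ _ _ ▸ (List.cons.injEq _ _ _ _ ▸ h).1).1,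
                 (Prod.mk.injEq _ _ _ _ ▸ (List.cons.injEq _ _ _ _ ▸ h).1).2⟩
        · exact (List.cons.injEq _ _ _ _ ▸ h).2
      obtain ⟨rfl, rfl⟩ := hk
      subst hrest
      have h1 := L1g row (k + 1)
      simp only [show (k : Int) + 1 - 1 = k from by ring] at h1
      have hLst : k + 1 ≤ lastFst k ((PySem.List.enumerate row (k + 1)).filter (fun p => p.2 ≠ 0)) + 1 :=
        lastFst_ge (by omega)
      have htk : (lastFst k ((PySem.List.enumerate row (k + 1)).filter (fun p => p.2 ≠ 0)) + 1 - k).toNat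
          = (lastFst k ((PySem.List.enumerate row (k + 1)).filter (fun p => p.2 ≠ 0)) + 1 - (k + 1)).toNat + 1 := by
        omega
      simp only [show (k - k : Int).toNat = 0 by omega, List.drop_zero, htk, List.take_succ_cons]
      exact congrArg (a :: ·) h1

lemma lenfilt (row : List Int) (k : Int) :
    ((PySem.List.enumerate row k).filter (fun p => p.2 ≠ 0)).length
      = (row.filter (fun v => v ≠ 0)).length := by
  induction row generalizing k with
  | nil => simp [PySem.List.enumerate]
  | cons a row ih =>
    have hih := ih (k + 1)
    by_cases ha : a = 0
    · simp only [PySem.List.enumerate_cons, List.filter_cons]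
      simp [ha]
      simpa using hih
    · simp only [PySem.List.enumerate_cons, List.filter_cons]
      simp [ha]
      simpa using hih

-- pyRange with a positive step: cons and nil forms
lemma pyRange_pos_nil (a b s : Int) (hs : 0 < s) (h : b ≤ a) : PySem.List.pyRange a b s = [] := by
  rw [PySem.List.pyRange_of_pos a b hs]
  simp [show ¬ a < b by omega]

lemma pyRange_pos_cons (a b s : Int) (hs : 0 < s) (h : a < b) :
    PySem.List.pyRange a b s = a :: PySem.List.pyRange (a + s) b s := by
  rw [PySem.List.pyRange_of_pos a b hs, PySem.List.pyRange_of_pos (a + s) b hs]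
  have hnum : ((b - a + s - 1) / s).toNat
      = (if a + s < b then ((b - (a + s) + s - 1) / s).toNat else 0) + 1 := by
    by_cases hab : a + s < b
    · rw [if_pos hab]
      have : b - a + s - 1 = (b - (a + s) + s - 1) + 1 * s := by ring
      rw [this, Int.add_mul_ediv_right _ _ (by omega : s ≠ 0)]
      have h0 : 0 ≤ (b - (a + s) + s - 1) / s := Int.ediv_nonneg (by omega) (by omega)
      omega
    · rw [if_neg hab]
      have hr : b - a + s - 1 = (b - a - 1) + 1 * s := by ring
      rw [hr, Int.add_mul_ediv_right _ _ (by omega : s ≠ 0)]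
      have h1 : (b - a - 1) / s = 0 := Int.ediv_eq_zero_of_lt (by omega) (by omega)
      omega
  rw [if_pos h, hnum, List.range_succ_eq_map]
  simp [List.map_map, Function.comp_def]
  intro k hk
  ring

lemma aWriteBlock_shift (w : Int) (pat : List Int) (i x : Int) (r : List Int) :
    aWriteBlock w x r (PySem.List.enumerate pat i) = aWriteBlock w (x + i) r (PySem.List.enumerate pat 0) := by
  induction pat generalizing i x r with
  | nil => simp [PySem.List.enumerate, aWriteBlock]
  | cons v pat ih =>
    rw [PySem.List.enumerate_cons, PySem.List.enumerate_cons]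
    simp only [aWriteBlock, add_zero]
    rw [ih (i + 1) x]
    norm_num
    rw [ih 1 (x + i)]
    have : x + (i + 1) = x + i + 1 := by ring
    rw [this]

lemma aWriteBlock_none (w x : Int) (r : List Int) (ps : List (Int × Int))
    (h : ∀ p ∈ ps, ¬ (x + p.1 < w)) : aWriteBlock w x r ps = r := by
  induction ps generalizing r with
  | nil => rfl
  | cons p ps ih =>
    cases p with
    | mk i v =>
      simp only [aWriteBlock, if_neg (h (i, v) (by simp))]
      exact ih _ (fun q hq => h q (by simp [hq]))

lemma W1 (w : Int) (pat : List Int) (x : Int) (r : List Int)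
    (h0 : 0 ≤ x) (hxw : x ≤ w) (hwr : w.toNat ≤ r.length) :
    aWriteBlock w x r (PySem.List.enumerate pat)
      = r.take x.toNat ++ pat.take (w.toNat - x.toNat) ++ r.drop (min (x.toNat + pat.length) w.toNat) := by
  induction pat generalizing x r with
  | nil =>
    have hmin : min x.toNat w.toNat = x.toNat := by omega
    simp [PySem.List.enumerate, aWriteBlock, hmin]
  | cons v pat ih =>
    rw [PySem.List.enumerate_cons]
    simp only [aWriteBlock, add_zero]
    by_cases hx : x < w
    · rw [if_pos hx, aWriteBlock_shift, zero_add]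
      have hlt : x.toNat < r.length := by omega
      have hset : pySet r x v = r.take x.toNat ++ v :: r.drop (x.toNat + 1) := by
        unfold pySet
        rw [List.set_eq_take_append_cons_drop, if_pos hlt]
      have hlen : w.toNat ≤ (pySet r x v).length := by
        unfold pySet; simpa using hwr
      rw [ih (x + 1) _ (by omega) (by omega) hlen, hset]
      have hx1 : (x + 1).toNat = x.toNat + 1 := by omega
      have hA : (r.take x.toNat).length = x.toNat := by
        simp; omega
      -- prefix: take (x+1) of (A ++ v :: tail) = A ++ [v]
      have hpre : (r.take x.toNat ++ v :: r.drop (x.toNat + 1)).take (x.toNat + 1)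
          = r.take x.toNat ++ [v] := by
        rw [show x.toNat + 1 = x.toNat + 1 from rfl, List.take_add,
          List.take_left' hA, List.drop_left' hA]
        rfl
      -- suffix: drop m of (A ++ v :: tail) = r.drop m for m ≥ x.toNat + 1
      have hsuf : ∀ m, x.toNat + 1 ≤ m →
          (r.take x.toNat ++ v :: r.drop (x.toNat + 1)).drop m = r.drop m := by
        intro m hm
        have h2 : (r.take x.toNat ++ [v]).length = x.toNat + 1 := by simp [hA]
        rw [show r.take x.toNat ++ v :: r.drop (x.toNat + 1)
            = (r.take x.toNat ++ [v]) ++ r.drop (x.toNat + 1) from by simp,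
          List.drop_append, h2, List.drop_drop, List.drop_of_length_le (by simp [h2]; omega)]
        rw [show x.toNat + 1 + (m - (x.toNat + 1)) = m from by omega]
        simp
      rw [hx1, hpre, hsuf _ (by omega)]
      have htake : (v :: pat).take (w.toNat - x.toNat) = v :: pat.take (w.toNat - (x.toNat + 1)) := by
        rw [show w.toNat - x.toNat = (w.toNat - (x.toNat + 1)) + 1 from by omega, List.take_succ_cons]
      rw [htake, show x.toNat + 1 + pat.length = x.toNat + (pat.length + 1) from by omega]
      simp
    · rw [if_neg hx, zero_add]
      have hxw' : x = w := le_antisymm hxw (by omega)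
      have hz : aWriteBlock w x r (PySem.List.enumerate pat 1) = r := by
        apply aWriteBlock_none
        intro p hp
        rcases (PySem.List.mem_enumerate_iff pat 1 p).1 hp with ⟨j, hj, rfl⟩
        simp only
        omega
      rw [hz]
      have : w.toNat - x.toNat = 0 := by omega
      rw [this, List.take_zero]
      have hmin : min (x.toNat + (pat.length + 1)) w.toNat = x.toNat := by omega
      simp only [List.length_cons]
      rw [hmin]
      simp [List.take_append_drop]

lemma tile_drop (pat : List Int) (reps q : Nat) (hq : q ≤ reps) :
    ((List.replicate reps pat).flatten).drop (q * pat.length)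
      = ((List.replicate (reps - q) pat).flatten) := by
  induction q generalizing reps with
  | zero => simp
  | succ q ih =>
    cases reps with
    | zero => omega
    | succ reps =>
      rw [List.replicate_succ, List.flatten_cons, show (q + 1) * pat.length = pat.length + q * pat.length by ring,
        ← List.drop_drop, List.drop_left]
      exact (by omega : reps + 1 - (q + 1) = reps - q) ▸ ih reps (by omega)

lemma tile_take_ext (pat : List Int) (reps q s : Nat) (hs : s ≤ pat.length) (hq : q < reps) :
    ((List.replicate reps pat).flatten).take (q * pat.length + s)
      = ((List.replicate reps pat).flatten).take (q * pat.length) ++ pat.take s := by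
  rw [List.take_add, tile_drop pat reps q (by omega)]
  congr 1
  have : reps - q = (reps - q - 1) + 1 := by omega
  rw [this, List.replicate_succ, List.flatten_cons, List.take_append_of_le_length hs]

lemma W2 (pat row : List Int) (hpat : pat ≠ []) (w : Int) (f reps : Nat)
    (hwrow : w.toNat ≤ row.length) (hcov : w.toNat ≤ f + reps * pat.length) :
    ∀ (d q : Nat) (x : Int) (r : List Int),
      (w - x).toNat ≤ d →
      x = (f : Int) + (q : Int) * pat.length → x < w →
      r = row.take f ++ ((List.replicate reps pat).flatten).take (x.toNat - f) ++ row.drop x.toNat →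
      (PySem.List.pyRange x w (pat.length : Int)).foldl
          (fun r x => aWriteBlock w x r (PySem.List.enumerate pat)) r
        = row.take f ++ ((List.replicate reps pat).flatten).take (w.toNat - f) ++ row.drop w.toNat := by
  have hL : 0 < pat.length := List.length_pos_of_ne_nil hpat
  have hTlen : ((List.replicate reps pat).flatten).length = reps * pat.length := by
    simp [List.length_flatten, Nat.mul_comm]
  intro d
  induction d with
  | zero =>
    intro q x r hd hx hxw hr
    omega
  | succ d ih =>
    intro q x r hd hx hxw hr
    have hcast : ((q * pat.length : Nat) : Int) = (q : Int) * pat.length := by push_cast; ring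
    have h0x : 0 ≤ x := by omega
    have hxN : x.toNat = f + q * pat.length := by omega
    have hqreps : q < reps := by
      by_contra hc
      have : reps * pat.length ≤ q * pat.length := Nat.mul_le_mul_right _ (by omega)
      omega
    have hrlen : w.toNat ≤ r.length := by
      rw [hr]
      simp only [List.length_append, List.length_take, List.length_drop, hTlen]
      have : q * pat.length < reps * pat.length := Nat.mul_lt_mul_right hL |>.mpr hqreps
      omega
    rw [pyRange_pos_cons x w (pat.length : Int) (by exact_mod_cast hL) hxw, List.foldl_cons,
      W1 w pat x r h0x (le_of_lt hxw) hrlen]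
    have htake_r : r.take x.toNat = row.take f ++ ((List.replicate reps pat).flatten).take (x.toNat - f) := by
      rw [hr]
      rw [show row.take f ++ ((List.replicate reps pat).flatten).take (x.toNat - f) ++ row.drop x.toNat
          = (row.take f ++ ((List.replicate reps pat).flatten).take (x.toNat - f)) ++ row.drop x.toNat from by simp]
      apply List.take_left'
      simp only [List.length_append, List.length_take, hTlen]
      have : q * pat.length < reps * pat.length := Nat.mul_lt_mul_right hL |>.mpr hqreps
      omega
    have hdrop_r : ∀ m, x.toNat ≤ m → r.drop m = row.drop m := by
      intro m hm
      have hlen2 : (row.take f ++ ((List.replicate reps pat).flatten).take (x.toNat - f)).length = x.toNat := by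
        simp only [List.length_append, List.length_take, hTlen]
        have : q * pat.length < reps * pat.length := Nat.mul_lt_mul_right hL |>.mpr hqreps
        omega
      rw [hr, show row.take f ++ ((List.replicate reps pat).flatten).take (x.toNat - f) ++ row.drop x.toNat
          = (row.take f ++ ((List.replicate reps pat).flatten).take (x.toNat - f)) ++ row.drop x.toNat from by simp,
        List.drop_append, hlen2, List.drop_drop,
        List.drop_of_length_le (by rw [hlen2]; exact hm),
        show x.toNat + (m - x.toNat) = m from by omega]
      simp
    by_cases hnext : x + (pat.length : Int) < w
    · have hmin : min (x.toNat + pat.length) w.toNat = x.toNat + pat.length := by omega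
      have hpatfull : pat.take (w.toNat - x.toNat) = pat := List.take_of_length_le (by omega)
      have hext := tile_take_ext pat reps q pat.length (le_refl _) hqreps
      have hr1 : r.take x.toNat ++ pat.take (w.toNat - x.toNat) ++ r.drop (min (x.toNat + pat.length) w.toNat)
          = row.take f ++ ((List.replicate reps pat).flatten).take ((x + pat.length).toNat - f)
            ++ row.drop (x + pat.length).toNat := by
        rw [hmin, hpatfull, htake_r, hdrop_r _ (by omega)]
        have h1 : (x + (pat.length : Int)).toNat = x.toNat + pat.length := by omega
        have hext' : ((List.replicate reps pat).flatten).take (q * pat.length + pat.length)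
            = ((List.replicate reps pat).flatten).take (q * pat.length) ++ pat := by
          rw [hext, List.take_length]
        rw [h1, show x.toNat + pat.length - f = q * pat.length + pat.length from by omega,
          show x.toNat - f = q * pat.length from by omega, hext']
        simp
      rw [hr1]
      exact ih (q + 1) (x + pat.length) _ (by omega) (by rw [hx]; push_cast; ring) hnext rfl
    · rw [pyRange_pos_nil (x + pat.length) w (pat.length : Int) (by exact_mod_cast hL) (by omega),
        List.foldl_nil]
      have hmin : min (x.toNat + pat.length) w.toNat = w.toNat := by omega
      have hext := tile_take_ext pat reps q (w.toNat - x.toNat) (by omega) hqreps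
      rw [hmin, htake_r, hdrop_r _ (by omega),
        show x.toNat - f = q * pat.length from by omega,
        show w.toNat - f = q * pat.length + (w.toNat - x.toNat) from by omega, hext]
      simp

-- A's row body = B's row body whenever the row is long enough (or has < 2 non-zeros)
lemma row_main (n : Nat) (row : List Int)
    (h : 2 ≤ (row.filter (fun v => v ≠ 0)).length → n ≤ row.length) :
    aRow (n : Int) row = bRow (n : Int) row := by
  unfold aRow bRow
  dsimp only
  rw [← PySem.List.enumerate_eq_map_pyRange row 0]
  by_cases hlen : ((PySem.List.enumerate row).filter (fun p => p.2 ≠ 0)).length < 2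
  · rw [if_pos hlen, if_neg (by rw [List.length_map]; omega)]
  · rw [if_neg hlen, if_pos (by rw [List.length_map]; omega)]
    have hwrow : n ≤ row.length := h (by rw [← lenfilt row 0]; omega)
    have hpairlt : ((PySem.List.enumerate row).filter (fun p => p.2 ≠ 0)).Pairwise
        (fun a b => a.1 < b.1) := (PySem.List.pairwise_lt_enumerate row 0).filter _
    rw [PySem.List.sorted_eq_self_of_pairwise _ _ (hpairlt.imp (fun hab => le_of_lt hab))]
    obtain ⟨f, v, rest, hps⟩ : ∃ f v rest,
        (PySem.List.enumerate row).filter (fun p => p.2 ≠ 0) = (f, v) :: rest := by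
      cases hc : (PySem.List.enumerate row).filter (fun p => p.2 ≠ 0) with
      | nil => rw [hc] at hlen; simp at hlen
      | cons p rest =>
        cases p with
        | mk a b => exact ⟨a, b, rest, rfl⟩
    have hrest : rest ≠ [] := by
      intro hr0
      rw [hps, hr0] at hlen
      simp at hlen
    have hfb := mem_filter_enumerate_bounds (hps ▸ List.mem_cons_self)
    have hf0 : 0 ≤ f := by simpa using hfb.1
    have hfrow : f < row.length := by
      have := hfb.2
      simpa using this
    -- the last recorded index
    have hLst : f < lastFst f rest ∧ lastFst f rest < row.length := by
      cases hgl : rest.getLast? with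
      | none => exact absurd (List.getLast?_eq_none_iff.1 hgl) hrest
      | some p =>
        have hpm : p ∈ rest := List.mem_of_getLast? hgl
        have hpf : f < p.1 := by
          rw [hps] at hpairlt
          exact (List.pairwise_cons.1 hpairlt).1 p hpm
        have hpb := mem_filter_enumerate_bounds (hps ▸ List.mem_cons_of_mem (f, v) hpm)
        refine ⟨?_, ?_⟩ <;> unfold lastFst <;> rw [hgl] <;> simp <;> [exact hpf; simpa using hpb.2]
    rw [hps]
    have hfirst : PySem.List.pyGetD ((f, v) :: rest) 0 ((0 : Int), (0 : Int)) = (f, v) := by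
      simp [pysem]
    rw [hfirst, PySem.List.slice_from_one, List.tail_cons, foldl_gapBuild]
    have hpat : ([v] ++ gapBuild f rest) = v :: gapBuild f rest := rfl
    have hL2 := L2g row 0 f v rest hps
    simp only [sub_zero] at hL2
    -- B's first and last
    have hBfirst : PySem.List.pyGetD (((f, v) :: rest).map (fun p => p.1)) 0 0 = f := by
      simp [pysem]
    have hBlast : PySem.List.pyGetD (((f, v) :: rest).map (fun p => p.1)) (-1) 0 = lastFst f rest := by
      unfold PySem.List.pyGetD
      rw [PySem.List.pyGet?_neg_one]
      unfold lastFst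
      rw [List.getLast?_map, List.getLast?_cons]
      cases rest.getLast? <;> simp
    rw [hBfirst, hBlast]
    -- B's pattern equals A's pattern
    have hBpat : PySem.List.slice row (some f) (some (lastFst f rest + 1))
        = v :: gapBuild f rest := by
      rw [PySem.List.slice_toNat row hf0 (by omega)]
      rw [show (lastFst f rest + 1).toNat - f.toNat = (lastFst f rest + 1 - f).toNat from by omega]
      exact hL2.symm
    rw [hBpat, hpat]
    set P := v :: gapBuild f rest with hPdef
    have hPlen : 0 < P.length := by simp [hPdef]
    by_cases hspan : 0 < (n : Int) - f
    · rw [if_pos hspan]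
      -- both sides tile P from f to n
      have hfl : f.toNat < n := by omega
      set LI : Int := (P.length : Int) with hLI
      have hLI0 : 0 < LI := by rw [hLI]; exact_mod_cast hPlen
      set qI : Int := ((n : Int) - f) / LI with hqI
      have hq0 : 0 ≤ qI := Int.ediv_nonneg (by omega) (by omega)
      have hede := Int.mul_ediv_add_emod ((n : Int) - f) LI
      have hemlt := Int.emod_lt_of_pos ((n : Int) - f) hLI0
      have hcovI : (n : Int) - f < (qI + 1) * LI := by
        have : (qI + 1) * LI = LI * qI + LI := by ring
        rw [this]
        linarith
      have hreps : PySem.Int.floordiv ((n : Int) - f) (P.length : Int) = qI := by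
        rw [PySem.Int.floordiv_eq_ediv_of_pos hLI0]
      rw [hreps]
      have hqtc : (((qI + 1).toNat : Int)) = qI + 1 := Int.toNat_of_nonneg (by omega)
      have hprod : (((qI + 1).toNat * P.length : Nat) : Int) = (qI + 1) * LI := by
        push_cast [hqtc]
        rw [hLI]
      have hcov : n ≤ f.toNat + (qI + 1).toNat * P.length := by omega
      have hW2 := W2 P row (by simp [hPdef]) (n : Int) f.toNat (qI + 1).toNat
        (by simpa using hwrow) (by simpa using hcov)
        ((n : Int) - f).toNat 0 f row (by omega) (by push_cast; omega) (by omega)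
        (by simp)
      simp only [Int.toNat_natCast] at hW2
      rw [show (((f, v) : Int × Int).1) = f from rfl, hLI, hW2,
        PySem.List.slice_to _ (by omega : (0 : Int) ≤ (n : Int) - f),
        show ((n : Int) - f).toNat = n - f.toNat from by omega]
      simp
    · rw [if_neg hspan]
      dsimp only
      rw [pyRange_pos_nil f (n : Int) (P.length : Int) (by exact_mod_cast hPlen) (by omega),
        List.foldl_nil]

-- ===== VERDICT (by name: the statement is the Claim_ definition above) =====
theorem propagate_symbols_horizontally_spec : Claim_equal_propagate_symbols_horizontally := by
  intro grid delta sym1 sym2 hdom hpre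
  unfold Spec_propagate_symbols_horizontally
  rcases hpre with ⟨hne, hall⟩
  cases grid with
  | nil => exact absurd rfl hne
  | cons g0 gs =>
    unfold propagate_symbols_horizontally propagate_symbols_horizontally_alt
    have hg0 : PySem.List.pyGetD (g0 :: gs) 0 [] = g0 := by simp [pysem]
    rw [hg0]
    apply List.map_congr_left
    intro row hrow
    have hlen : 2 ≤ (row.filter (fun v => v ≠ 0)).length → g0.length ≤ row.length := by
      intro h2
      have := hall row hrow h2
      rwa [hg0] at this
    have := row_main g0.length row hlen
    simpa [PySem.List.len] using this
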